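-- pv_equiv track=rewrite | github.com/chengzhi43/worldquant-alpha-aiac | backend/agents/prompts/base.py | build_operators_context
-- ===== SOURCE A (Python) =====
-- from typing import Dict, List
--
-- def build_operators_context(operators: List[Dict], max_ops: int = 40) -> str:
--     """Build operator reference grouped by category."""
--     if not operators:
--         return "Use standard operators."
--
--     by_category: Dict[str, List[str]] = {}
--     for op in operators[:max_ops]:
--         cat = op.get("category", "Other")
--         if cat not in by_category:
--             by_category[cat] = []
--         op_name = op.get("name", op.get("id", "unknown"))
--         by_category[cat].append(op_name)
--
--     lines = []
--     for cat, op_names in sorted(by_category.items()):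
--         lines.append(f"- {cat}: {', '.join(op_names[:10])}")
--
--     return "\n".join(lines)
-- ===== SOURCE B (Python) =====
-- from typing import Dict, List
--
-- def build_operators_context(operators: List[Dict], max_ops: int = 40) -> str:
--     """Build operator reference grouped by category (no dict grouping:
--     extract (category, name) pairs once, sort the distinct categories,
--     then filter the pairs per category)."""
--     if not operators:
--         return "Use standard operators."
--     pairs = [(op.get("category", "Other"), op.get("name", op.get("id", "unknown")))
--              for op in operators[:max_ops]]
--     cats = sorted({c for c, _ in pairs})
--     return "\n".join(
--         "- {}: {}".format(c, ", ".join([n for cc, n in pairs if cc == c][:10]))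
--         for c in cats)
-- ===== Notes on version B (the rewrite author's own statement) =====
-- stated objective: alternative
-- what changed: Replaces the incremental dict-of-lists grouping and sorted(dict.items()) with a flat (category, name) pair extraction, a sort of the distinct categories, and a per-category filter of the pair list.
import Mathlib
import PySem

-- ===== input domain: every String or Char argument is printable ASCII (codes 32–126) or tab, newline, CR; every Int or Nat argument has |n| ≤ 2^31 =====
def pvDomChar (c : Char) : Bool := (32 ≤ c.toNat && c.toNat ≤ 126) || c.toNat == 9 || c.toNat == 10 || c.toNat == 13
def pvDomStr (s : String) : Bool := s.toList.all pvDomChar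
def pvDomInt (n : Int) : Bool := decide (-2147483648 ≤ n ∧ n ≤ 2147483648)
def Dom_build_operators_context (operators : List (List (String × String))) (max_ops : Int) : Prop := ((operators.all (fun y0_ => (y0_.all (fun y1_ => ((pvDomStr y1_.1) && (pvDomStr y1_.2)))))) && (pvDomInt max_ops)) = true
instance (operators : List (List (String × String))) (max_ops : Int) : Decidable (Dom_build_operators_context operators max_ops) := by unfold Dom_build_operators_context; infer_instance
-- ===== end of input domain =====

-- B replaces A's incremental dict grouping + sorted(items) with pair extraction,
-- a sort of the distinct categories and a per-category filter; alternative decomposition, same results.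

-- op.get(k, dflt) on the operator dict (assoc list, first match)
def pyGetKeyD (op : List (String × String)) (k dflt : String) : String :=
  match op.find? (fun p => p.1 == k) with
  | some p => p.2
  | none => dflt

-- ===== PORT A =====
-- sorted(by_category.items()) is ported with key = first component: dict keys are
-- distinct, so Python's tuple comparison is decided by the category alone (exact here).
def build_operators_context (operators : List (List (String × String))) (max_ops : Int) : String :=
  if operators = [] then "Use standard operators."
  else
    let by_category : PySem.Dict String (List String) :=
      (PySem.List.slice operators none (some max_ops)).foldl
        (fun d op =>
          let cat := pyGetKeyD op "category" "Other"
          let d := if d.contains cat then d else d.insert cat ([] : List String)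
          d.insert cat (d.getD cat [] ++ [pyGetKeyD op "name" (pyGetKeyD op "id" "unknown")]))
        PySem.Dict.empty
    let lines := (PySem.List.sorted by_category.items (fun p => p.1) false).map
      (fun p => "- " ++ p.1 ++ ": " ++ PySem.Str.join ", " (PySem.List.slice p.2 none (some 10)))
    PySem.Str.join "\n" lines

-- ===== PORT B =====
def build_operators_context_alt (operators : List (List (String × String))) (max_ops : Int) : String :=
  if operators = [] then "Use standard operators."
  else
    let pairs := (PySem.List.slice operators none (some max_ops)).map
      (fun op => (pyGetKeyD op "category" "Other",
                  pyGetKeyD op "name" (pyGetKeyD op "id" "unknown")))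
    let cats := PySem.List.sorted (PySem.Set.ofList (pairs.map (fun p => p.1))) (fun c => c) false
    PySem.Str.join "\n" (cats.map (fun c =>
      "- " ++ c ++ ": " ++ PySem.Str.join ", "
        (PySem.List.slice ((pairs.filter (fun p => p.1 == c)).map (fun p => p.2)) none (some 10))))

-- ===== PRECONDITION & SPEC =====
def Spec_build_operators_context (operators : List (List (String × String))) (max_ops : Int) (out : String) : Prop := out = build_operators_context_alt operators max_ops
instance (operators : List (List (String × String))) (max_ops : Int) (out : String) : Decidable (Spec_build_operators_context operators max_ops out) := by unfold Spec_build_operators_context; infer_instance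

-- ===== CLAIM (what is proved, stated in full; the proofs are below) =====
def Claim_equal_build_operators_context : Prop := ∀ (operators : List (List (String × String))) (max_ops : Int), Dom_build_operators_context operators max_ops → Spec_build_operators_context operators max_ops (build_operators_context operators max_ops)

-- ===== LEMMAS AND PROOFS =====

-- the body of A's grouping loop equals a single dict.modify step
theorem stepEqModify (d : PySem.Dict String (List String)) (p : String × String) :
    (let d1 := if d.contains p.1 then d else d.insert p.1 ([] : List String)
     d1.insert p.1 (d1.getD p.1 [] ++ [p.2]))
    = d.modify p.1 [] (fun v => v ++ [p.2]) := by
  show _ = d.insert p.1 (d.getD p.1 [] ++ [p.2])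
  by_cases h : d.contains p.1 = true
  · simp [h]
  · simp only [Bool.not_eq_true] at h
    simp [h, PySem.Dict.insert_insert_self, PySem.Dict.getD_insert_self,
      PySem.Dict.getD_of_not_contains d _ h]

-- the items of A's grouped dict: sorted-free characterisation by dedup + filter
theorem itemsChar (ps : List (String × String)) :
    (ps.foldl (fun d p => d.modify p.1 [] (fun v => v ++ [p.2])) PySem.Dict.empty).items
    = (PySem.Set.ofList (ps.map (fun p => p.1))).map
        (fun c => (c, (ps.filter (fun p => p.1 == c)).map (fun p => p.2))) := by
  set d := ps.foldl (fun d p => d.modify p.1 [] (fun v => v ++ [p.2])) PySem.Dict.empty with hd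
  have hkeys : d.keys = PySem.Set.ofList (ps.map (fun p => p.1)) := by
    rw [hd, PySem.Dict.keys_foldl_modify_key ps (fun p => p.1) [] (fun _ p => (fun v => v ++ [p.2])),
      PySem.Dict.keys_empty]
    rfl
  have hnd : d.keys.Nodup := by
    rw [hd]
    exact PySem.Dict.nodup_keys_foldl_modify_key ps (fun p => p.1) []
      (fun _ p => (fun v => v ++ [p.2])) _ PySem.Dict.nodup_keys_empty
  rw [PySem.Dict.items_eq_map_keys d hnd [], hkeys]
  refine List.map_congr_left (fun c _ => ?_)
  rw [hd, PySem.Dict.getD_foldl_modify_append, PySem.Dict.getD_empty, List.nil_append]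

-- sorting key-tagged pairs by their key = mapping over the sorted distinct keys
theorem sortedMap (C : List String) (hnd : C.Nodup) (g : String → String × List String)
    (hg : ∀ c, (g c).1 = c) :
    PySem.List.sorted (C.map g) (fun p => p.1) false
    = (PySem.List.sorted C (fun c => c) false).map g := by
  apply PySem.List.sorted_eq_of_perm_of_pairwise_lt
  · exact (PySem.List.sorted_perm C (fun c => c) false).map g
  · rw [List.pairwise_map]
    have h1 : List.Pairwise (fun a b => a ≤ b) (PySem.List.sorted C (fun c => c) false) :=
      PySem.List.sorted_pairwise C (fun c => c)
    have h2 : (PySem.List.sorted C (fun c => c) false).Nodup :=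
      (PySem.List.sorted_perm C (fun c => c) false).nodup_iff.mpr hnd
    exact (h1.and h2).imp (fun h => by
      simp only [hg]; exact lt_of_le_of_ne h.1 h.2)

theorem build_operators_context_spec : Claim_equal_build_operators_context := by
  intro operators max_ops _
  unfold Spec_build_operators_context build_operators_context build_operators_context_alt
  by_cases hop : operators = []
  · simp [hop]
  · simp only [hop, if_false]
    set ops := PySem.List.slice operators none (some max_ops) with hops
    set pairs := ops.map (fun op => (pyGetKeyD op "category" "Other",
      pyGetKeyD op "name" (pyGetKeyD op "id" "unknown"))) with hpairs
    have hfold :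
        ops.foldl (fun d op =>
          let cat := pyGetKeyD op "category" "Other"
          let d := if d.contains cat then d else d.insert cat ([] : List String)
          d.insert cat (d.getD cat [] ++ [pyGetKeyD op "name" (pyGetKeyD op "id" "unknown")]))
          PySem.Dict.empty
        = pairs.foldl (fun d p => d.modify p.1 [] (fun v => v ++ [p.2])) PySem.Dict.empty := by
      rw [hpairs, List.foldl_map]
      congr 1
      funext d op
      simpa using stepEqModify d (pyGetKeyD op "category" "Other", pyGetKeyD op "name" (pyGetKeyD op "id" "unknown"))
    rw [hfold, itemsChar pairs,
      sortedMap _ (PySem.Set.nodup_ofList _) _ (fun c => rfl), List.map_map]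
    exact congrArg _ (List.map_congr_left fun c _ => rfl)
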